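-- pv_equiv track=rewrite | github.com/DavidH-Creation/case-adversarial-engine | engines/report_generation/v3/issue_map.py | _deduplicate_thesis
-- ===== SOURCE A (Python) =====
-- from collections import defaultdict
--
-- _CHILD_THESIS_MAX_LEN = 120
--
-- _THESIS_REUSE_LIMIT = 3
--
-- _THESIS_TRUNCATE_LEN = 200
--
-- def _truncate_thesis(text: str, max_len: int) -> str:
--     """Truncate thesis to max_len, ending at a sentence boundary if possible."""
--     if len(text) <= max_len:
--         return text
--     # Try to cut at the last sentence-ending punctuation within the limit.
--     truncated = text[:max_len]
--     for sep in ("。", "；", ".", ";"):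
--         idx = truncated.rfind(sep)
--         if idx > max_len // 2:
--             return truncated[: idx + 1]
--     return truncated + "…"
--
-- def _deduplicate_thesis(
--     thesis_map: dict[str, str],
--     issue_ids: list[str],
-- ) -> dict[str, str]:
--     """Detect reused thesis paragraphs and truncate duplicates.
--
--     If a thesis text (>200 chars) appears across 3+ issues, keep only
--     the first occurrence at full length; subsequent ones are truncated.
--     """
--     if not thesis_map:
--         return thesis_map
--
--     # Count occurrences of each thesis text.
--     text_to_ids: dict[str, list[str]] = defaultdict(list)
--     for iid in issue_ids:
--         text = thesis_map.get(iid, "")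
--         if text:
--             text_to_ids[text].append(iid)
--
--     result = dict(thesis_map)
--     for text, ids in text_to_ids.items():
--         if len(text) > _THESIS_TRUNCATE_LEN and len(ids) >= _THESIS_REUSE_LIMIT:
--             # Keep the first occurrence full-length, truncate the rest.
--             for iid in ids[1:]:
--                 result[iid] = _truncate_thesis(text, _CHILD_THESIS_MAX_LEN)
--
--     return result
-- ===== SOURCE B (Python) =====
-- from collections import Counter
--
-- _CHILD_THESIS_MAX_LEN = 120
-- _THESIS_REUSE_LIMIT = 3
-- _THESIS_TRUNCATE_LEN = 200
--
--
-- def _truncate_thesis(text: str, max_len: int) -> str: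
--     """Truncate thesis to max_len, ending at a sentence boundary if possible."""
--     if len(text) <= max_len:
--         return text
--     truncated = text[:max_len]
--     for sep in ("。", "；", ".", ";"):
--         idx = truncated.rfind(sep)
--         if idx > max_len // 2:
--             return truncated[: idx + 1]
--     return truncated + "…"
--
--
-- def _deduplicate_thesis(
--     thesis_map: dict[str, str],
--     issue_ids: list[str],
-- ) -> dict[str, str]:
--     """Counter + seen-set version: no per-text id lists are built."""
--     if not thesis_map:
--         return thesis_map
--
--     counts = Counter(
--         t for t in (thesis_map.get(iid, "") for iid in issue_ids) if t
--     )
--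
--     result = dict(thesis_map)
--     seen: set[str] = set()
--     for iid in issue_ids:
--         text = thesis_map.get(iid, "")
--         if text and len(text) > _THESIS_TRUNCATE_LEN and counts[text] >= _THESIS_REUSE_LIMIT:
--             if text in seen:
--                 result[iid] = _truncate_thesis(text, _CHILD_THESIS_MAX_LEN)
--             else:
--                 seen.add(text)
--     return result
-- ===== Notes on version B (the rewrite author's own statement) =====
-- stated objective: simpler
-- what changed: A groups issue ids into per-text lists with a defaultdict and then truncates each list's tail; B builds only a Counter of thesis texts and does one pass over issue_ids with a 'seen' set, truncating every non-first occurrence, so no per-text id lists are materialised.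
import Mathlib
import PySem

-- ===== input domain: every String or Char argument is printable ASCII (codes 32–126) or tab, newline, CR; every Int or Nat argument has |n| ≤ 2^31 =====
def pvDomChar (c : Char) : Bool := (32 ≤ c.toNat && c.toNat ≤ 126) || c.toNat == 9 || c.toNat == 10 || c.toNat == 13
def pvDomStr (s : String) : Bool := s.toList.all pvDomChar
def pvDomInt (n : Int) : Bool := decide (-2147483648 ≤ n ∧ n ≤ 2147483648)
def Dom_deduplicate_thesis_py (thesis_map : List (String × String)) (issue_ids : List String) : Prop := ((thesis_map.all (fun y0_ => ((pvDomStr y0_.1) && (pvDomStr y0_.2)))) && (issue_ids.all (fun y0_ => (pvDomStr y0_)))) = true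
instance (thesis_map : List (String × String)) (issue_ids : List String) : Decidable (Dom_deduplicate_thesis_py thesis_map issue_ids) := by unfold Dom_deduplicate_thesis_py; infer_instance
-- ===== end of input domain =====

-- B replaces A's defaultdict of per-text id lists by a Counter over thesis texts plus a
-- single 'seen' pass that truncates every non-first occurrence; objective: simpler (no id
-- lists are materialised), same asymptotic cost.

-- ===== PORT A =====
-- shared helper _truncate_thesis (identical source in Source A and Source B)
def truncate_thesis (text : String) (max_len : Int) : String :=
  if PySem.Str.len text ≤ max_len then text
  else
    let truncated := PySem.Str.slice text none (some max_len)
    -- 'for sep in (…): … return …' = first separator whose last occurrence lies past max_len // 2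
    match ["。", "；", ".", ";"].findSome? (fun sep =>
      let idx := PySem.Str.rfind truncated sep
      if PySem.Int.floordiv max_len 2 < idx then
        some (PySem.Str.slice truncated none (some (idx + 1)))
      else none) with
    | some r => r
    | none => truncated ++ "…"

def deduplicate_thesis_py (thesis_map : List (String × String)) (issue_ids : List String) : List (String × String) :=
  if thesis_map = [] then thesis_map
  else
    -- text_to_ids: defaultdict(list) grouping issue ids by their thesis text
    let text_to_ids : PySem.Dict String (List String) :=
      issue_ids.foldl (fun d iid =>
        let text := PySem.Dict.getD ⟨thesis_map⟩ iid ""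
        if text ≠ "" then d.modify text [] (fun l => l ++ [iid]) else d) PySem.Dict.empty
    let result : PySem.Dict String String :=
      text_to_ids.items.foldl (fun r p =>
        if (200 : Int) < PySem.Str.len p.1 ∧ (3 : Int) ≤ PySem.List.len p.2 then
          (PySem.List.slice p.2 (some 1) none).foldl
            (fun r iid => r.insert iid (truncate_thesis p.1 120)) r
        else r) ⟨thesis_map⟩
    result.items

-- ===== PORT B =====
def deduplicate_thesis_py_alt (thesis_map : List (String × String)) (issue_ids : List String) : List (String × String) :=
  if thesis_map = [] then thesis_map
  else
    -- counts = Counter(t for t in (thesis_map.get(iid, "") for iid in issue_ids) if t)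
    let counts : PySem.Dict String Int :=
      PySem.Dict.counter
        ((issue_ids.map (fun iid => PySem.Dict.getD ⟨thesis_map⟩ iid "")).filter (fun t => t != ""))
    -- one pass with a 'seen' set: first qualifying occurrence kept, the rest truncated
    let st := issue_ids.foldl
      (fun (st : PySem.Dict String String × PySem.Set String) iid =>
        let text := PySem.Dict.getD ⟨thesis_map⟩ iid ""
        if text ≠ "" ∧ (200 : Int) < PySem.Str.len text ∧ (3 : Int) ≤ counts.getD text 0 then
          if text ∈ st.2 then (st.1.insert iid (truncate_thesis text 120), st.2)
          else (st.1, PySem.Set.add st.2 text)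
        else st)
      (⟨thesis_map⟩, PySem.Set.empty)
    st.1.items

-- ===== PRECONDITION & SPEC =====
def Spec_deduplicate_thesis_py (thesis_map : List (String × String)) (issue_ids : List String) (out : List (String × String)) : Prop := out = deduplicate_thesis_py_alt thesis_map issue_ids
instance (thesis_map : List (String × String)) (issue_ids : List String) (out : List (String × String)) : Decidable (Spec_deduplicate_thesis_py thesis_map issue_ids out) := by unfold Spec_deduplicate_thesis_py; infer_instance

-- ===== CLAIM (what is proved, stated in full; the proofs are below) =====
def Claim_equal_deduplicate_thesis_py : Prop := ∀ (thesis_map : List (String × String)) (issue_ids : List String), Dom_deduplicate_thesis_py thesis_map issue_ids → Spec_deduplicate_thesis_py thesis_map issue_ids (deduplicate_thesis_py thesis_map issue_ids)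

-- ===== LEMMAS AND PROOFS =====

-- the thesis text of an issue id, and the truncated value both programs write
def pvTxt (tm : List (String × String)) (iid : String) : String :=
  PySem.Dict.getD ⟨tm⟩ iid ""

def pvVal (tm : List (String × String)) (iid : String) : String :=
  truncate_thesis (pvTxt tm iid) 120

-- the ids carrying a given thesis text, in issue_ids order
def pvGroup (tm : List (String × String)) (ids : List String) (t : String) : List String :=
  ids.filter (fun i => pvTxt tm i == t)

-- folding 'result[iid] = …truncated…' over a list of ids
def pvIns (tm : List (String × String)) (r : PySem.Dict String String) (L : List String) : PySem.Dict String String :=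
  L.foldl (fun r iid => r.insert iid (pvVal tm iid)) r

-- B's selection: ids whose (qualifying) text was already seen
def pvPick (tm : List (String × String)) (q : String → Bool) : PySem.Set String → List String → List String
  | _, [] => []
  | s, i :: ids =>
    let t := pvTxt tm i
    if q t then
      (if t ∈ s then i :: pvPick tm q s ids else pvPick tm q (PySem.Set.add s t) ids)
    else pvPick tm q s ids

theorem pvIns_append (tm : List (String × String)) (r : PySem.Dict String String) (a b : List String) :
    pvIns tm r (a ++ b) = pvIns tm (pvIns tm r a) b := by
  simp [pvIns, List.foldl_append]

-- a contained-key insert rewrites the items list pointwise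
theorem pvIns_items (tm : List (String × String)) (items : List (String × String)) (L : List String)
    (h : ∀ x ∈ L, (PySem.Dict.mk items).contains x = true) :
    (pvIns tm ⟨items⟩ L).items
      = items.map (fun p => if p.1 ∈ L then (p.1, pvVal tm p.1) else p) := by
  induction L generalizing items with
  | nil => simp [pvIns]
  | cons x L ih =>
    have hx : (PySem.Dict.mk items).contains x = true := h x (by simp)
    have hins : (PySem.Dict.mk items).insert x (pvVal tm x)
        = ⟨items.map (fun p => if p.1 == x then (x, pvVal tm x) else p)⟩ := by
      simp [PySem.Dict.insert, hx]
    have hcont : ∀ y, (PySem.Dict.mk (items.map (fun p => if p.1 == x then (x, pvVal tm x) else p))).contains y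
        = (PySem.Dict.mk items).contains y := by
      intro y
      simp only [PySem.Dict.contains, List.any_map]
      congr 1
      funext p
      by_cases hpx : p.1 == x
      · have : p.1 = x := by simpa using hpx
        simp [Function.comp, this]
      · simp [Function.comp, hpx]
    have := ih (items.map (fun p => if p.1 == x then (x, pvVal tm x) else p))
      (fun y hy => by rw [hcont]; exact h y (by simp [hy]))
    have step1 : pvIns tm ⟨items⟩ (x :: L) = pvIns tm ((PySem.Dict.mk items).insert x (pvVal tm x)) L := by
      simp [pvIns]
    rw [step1, hins, this, List.map_map]
    apply List.map_congr_left
    intro p _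
    by_cases hpx : p.1 = x
    · subst hpx
      by_cases hmem : p.1 ∈ L <;> simp [Function.comp, hmem]
    · have hb : (p.1 == x) = false := by simpa using hpx
      by_cases hmem : p.1 ∈ L <;> simp [Function.comp, hb, hpx, hmem]

theorem pvGroup_mem (tm : List (String × String)) (ids : List String) (t x : String) :
    x ∈ pvGroup tm ids t ↔ x ∈ ids ∧ pvTxt tm x = t := by
  simp [pvGroup, List.mem_filter]

theorem pvGroup_cons (tm : List (String × String)) (i : String) (ids : List String) (t : String) :
    pvGroup tm (i :: ids) t
      = if pvTxt tm i = t then i :: pvGroup tm ids t else pvGroup tm ids t := by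
  simp only [pvGroup, List.filter_cons]
  by_cases h : pvTxt tm i = t <;> simp [h]

-- a nonempty getD means the key is present
theorem pvContains_of_txt_ne (tm : List (String × String)) (x : String) (h : pvTxt tm x ≠ "") :
    (PySem.Dict.mk tm).contains x = true := by
  by_cases hc : (PySem.Dict.mk tm).contains x = true
  · exact hc
  · exfalso
    apply h
    have hget : (PySem.Dict.mk tm).get? x = none := by
      rw [PySem.Dict.get?_eq_none_iff_contains]
      simp only [PySem.Dict.contains, Bool.not_eq_true] at hc ⊢
      simpa [List.any_eq_true] using hc
    simp [pvTxt, PySem.Dict.getD, hget]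

-- the outer loop of A: grouped updates collapse to one pvIns over a flatMap
theorem pvFold_if_inner {α : Type} (tm : List (String × String)) (c : α → Prop) [DecidablePred c]
    (g : α → List String) (ps : List α) (r : PySem.Dict String String) :
    ps.foldl (fun r p => if c p then pvIns tm r (g p) else r) r
      = pvIns tm r (ps.flatMap fun p => if c p then g p else []) := by
  induction ps generalizing r with
  | nil => simp [pvIns]
  | cons p ps ih =>
    by_cases hc : c p <;> simp [hc, ih, pvIns_append]

-- the grouping dict of A: value at a nonempty text t is exactly pvGroup tm ids t
theorem pvGroupDict_getD (tm : List (String × String)) (ids : List String) (t : String) (ht : t ≠ "") :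
    (ids.foldl (fun d iid =>
        let text := PySem.Dict.getD ⟨tm⟩ iid ""
        if text ≠ "" then d.modify text [] (fun l => l ++ [iid]) else d) PySem.Dict.empty).getD t []
      = pvGroup tm ids t := by
  rw [show (fun (d : PySem.Dict String (List String)) iid =>
        let text := PySem.Dict.getD (⟨tm⟩ : PySem.Dict String String) iid ""
        if text ≠ "" then d.modify text [] (fun l => l ++ [iid]) else d)
      = (fun d iid => if pvTxt tm iid ≠ "" then d.modify (pvTxt tm iid) [] (fun l => l ++ [iid]) else d)
      from rfl]
  rw [PySem.List.foldl_ite_eq_foldl_filter (p := fun iid => pvTxt tm iid ≠ "")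
    (f := fun (d : PySem.Dict String (List String)) iid =>
      d.modify (pvTxt tm iid) [] (fun l => l ++ [iid])) (l := ids) (init := PySem.Dict.empty)]
  rw [show (fun (d : PySem.Dict String (List String)) iid =>
        d.modify (pvTxt tm iid) [] (fun l => l ++ [iid]))
      = (fun d (iid : String) =>
          (fun (d : PySem.Dict String (List String)) (p : String × String) =>
            d.modify p.1 [] (fun l => l ++ [p.2])) d ((fun i => (pvTxt tm i, i)) iid))
      from rfl]
  rw [← List.foldl_map (f := fun i => (pvTxt tm i, i))
    (g := fun (d : PySem.Dict String (List String)) (p : String × String) =>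
      d.modify p.1 [] (fun l => l ++ [p.2]))]
  rw [PySem.Dict.getD_foldl_modify_append]
  rw [List.filter_map, List.map_map]
  simp only [PySem.Dict.getD_empty, List.nil_append]
  rw [show ((fun x => x.2) ∘ fun i => (pvTxt tm i, i)) = id from rfl, List.map_id]
  rw [List.filter_filter]
  apply List.filter_congr
  intro i _
  simp only [Function.comp]
  by_cases hb : (pvTxt tm i == t) = true
  · have : pvTxt tm i = t := by simpa using hb
    simp [this, ht]
  · simp only [Bool.not_eq_true] at hb
    simp [hb]

theorem pvGroupDict_items (tm : List (String × String)) (ids : List String) :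
    (ids.foldl (fun d iid =>
        let text := PySem.Dict.getD ⟨tm⟩ iid ""
        if text ≠ "" then d.modify text [] (fun l => l ++ [iid]) else d) PySem.Dict.empty).items
      = (PySem.Set.ofList ((ids.filter (fun i => pvTxt tm i != "")).map (pvTxt tm))).map
          (fun t => (t, pvGroup tm ids t)) := by
  have hfilter : ids.filter (fun x => decide (pvTxt tm x ≠ ""))
      = ids.filter (fun i => pvTxt tm i != "") := by
    apply List.filter_congr
    intro i _
    by_cases h : pvTxt tm i = "" <;> simp [h]
  have hrw : ids.foldl (fun d iid =>
        let text := PySem.Dict.getD (⟨tm⟩ : PySem.Dict String String) iid ""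
        if text ≠ "" then d.modify text [] (fun l => l ++ [iid]) else d) PySem.Dict.empty
      = (ids.filter (fun x => decide (pvTxt tm x ≠ ""))).foldl
          (fun d i => d.modify (pvTxt tm i) [] (fun l => l ++ [i])) PySem.Dict.empty := by
    rw [show (fun (d : PySem.Dict String (List String)) iid =>
          let text := PySem.Dict.getD (⟨tm⟩ : PySem.Dict String String) iid ""
          if text ≠ "" then d.modify text [] (fun l => l ++ [iid]) else d)
        = (fun d iid => if pvTxt tm iid ≠ "" then d.modify (pvTxt tm iid) [] (fun l => l ++ [iid]) else d)
        from rfl]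
    rw [PySem.List.foldl_ite_eq_foldl_filter (p := fun iid => pvTxt tm iid ≠ "")
      (f := fun (d : PySem.Dict String (List String)) iid =>
        d.modify (pvTxt tm iid) [] (fun l => l ++ [iid])) (l := ids) (init := PySem.Dict.empty)]
  have hkeys : (ids.foldl (fun d iid =>
        let text := PySem.Dict.getD (⟨tm⟩ : PySem.Dict String String) iid ""
        if text ≠ "" then d.modify text [] (fun l => l ++ [iid]) else d) PySem.Dict.empty).keys
      = PySem.Set.ofList ((ids.filter (fun i => pvTxt tm i != "")).map (pvTxt tm)) := by
    rw [hrw]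
    rw [PySem.Dict.keys_foldl_modify_key (ids.filter (fun x => decide (pvTxt tm x ≠ "")))
      (pvTxt tm) [] (fun _ i => (fun l => l ++ [i])) PySem.Dict.empty]
    rw [hfilter]
    rfl
  have hnd : (ids.foldl (fun d iid =>
        let text := PySem.Dict.getD (⟨tm⟩ : PySem.Dict String String) iid ""
        if text ≠ "" then d.modify text [] (fun l => l ++ [iid]) else d) PySem.Dict.empty).keys.Nodup := by
    rw [hrw]
    exact PySem.Dict.nodup_keys_foldl_modify_key _ _ _ _ _
      (by simp [PySem.Dict.keys, PySem.Dict.empty])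
  rw [PySem.Dict.items_eq_map_keys _ hnd [], hkeys]
  apply List.map_congr_left
  intro t htK
  have ht : t ≠ "" := by
    have := (PySem.Set.mem_ofList _ _).1 htK
    rcases List.mem_map.1 this with ⟨i, hi, rfl⟩
    have := (List.mem_filter.1 hi).2
    simpa using this
  rw [pvGroupDict_getD tm ids t ht]

-- B's loop: the dict component is pvIns over the picked ids
theorem pvB_fold (tm : List (String × String)) (q : String → Bool) (ids : List String) :
    ∀ (s : PySem.Set String) (r : PySem.Dict String String),
    (ids.foldl (fun (st : PySem.Dict String String × PySem.Set String) iid =>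
        let text := pvTxt tm iid
        if q text = true then
          if text ∈ st.2 then (st.1.insert iid (truncate_thesis text 120), st.2)
          else (st.1, PySem.Set.add st.2 text)
        else st) (r, s)).1
      = pvIns tm r (pvPick tm q s ids) := by
  induction ids with
  | nil => intro s r; simp [pvPick, pvIns]
  | cons i ids ih =>
    intro s r
    show (List.foldl _ (if q (pvTxt tm i) = true then
        if pvTxt tm i ∈ s then (r.insert i (truncate_thesis (pvTxt tm i) 120), s)
        else (r, PySem.Set.add s (pvTxt tm i))
      else (r, s)) ids).1 = _
    by_cases hq : q (pvTxt tm i) = true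
    · by_cases hs : pvTxt tm i ∈ s
      · rw [if_pos hq, if_pos hs, ih]
        simp only [pvPick, hq, hs, if_pos]
        simp [pvIns, pvVal]
      · rw [if_pos hq, if_neg hs, ih]
        simp only [pvPick, hq, hs, if_true, if_false]
    · rw [if_neg hq, ih]
      simp [pvPick, hq]

-- which ids B picks: qualifying ids that are not the first occurrence of their text
theorem pvPick_mem (tm : List (String × String)) (q : String → Bool) (ids : List String) :
    ∀ (s : PySem.Set String) (x : String),
    x ∈ pvPick tm q s ids
      ↔ q (pvTxt tm x) = true ∧
          ((pvTxt tm x ∈ s ∧ x ∈ ids) ∨ x ∈ (pvGroup tm ids (pvTxt tm x)).tail) := by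
  induction ids with
  | nil => intro s x; simp [pvPick, pvGroup]
  | cons i ids ih =>
    intro s x
    have hmtail : x ∈ (pvGroup tm ids (pvTxt tm x)).tail → x ∈ ids :=
      fun hy => ((pvGroup_mem tm ids _ x).1 (List.mem_of_mem_tail hy)).1
    have hmgrp : x ∈ ids → x ∈ pvGroup tm ids (pvTxt tm x) :=
      fun h => (pvGroup_mem tm ids _ x).2 ⟨h, rfl⟩
    have hgrp_ids : x ∈ pvGroup tm ids (pvTxt tm x) → x ∈ ids :=
      fun h => ((pvGroup_mem tm ids _ x).1 h).1
    show x ∈ (if q (pvTxt tm i) = true then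
        (if pvTxt tm i ∈ s then i :: pvPick tm q s ids else pvPick tm q (PySem.Set.add s (pvTxt tm i)) ids)
      else pvPick tm q s ids) ↔ _
    rw [pvGroup_cons]
    by_cases hq : q (pvTxt tm i) = true
    · rw [if_pos hq]
      by_cases hs : pvTxt tm i ∈ s
      · rw [if_pos hs]
        by_cases hxt : pvTxt tm x = pvTxt tm i
        · rw [if_pos hxt.symm, List.tail_cons]
          have hqT : q (pvTxt tm x) = true := by rw [hxt]; exact hq
          have hTs : pvTxt tm x ∈ s := hxt ▸ hs
          have hxi : x = i → True := fun _ => trivial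
          simp only [List.mem_cons, ih]
          tauto
        · rw [if_neg (fun h => hxt h.symm)]
          have hxi : x ≠ i := fun h => hxt (h ▸ rfl)
          simp only [List.mem_cons, ih]
          tauto
      · rw [if_neg hs]
        have hadd : pvTxt tm x ∈ PySem.Set.add s (pvTxt tm i)
            ↔ (pvTxt tm x ∈ s ∨ pvTxt tm x = pvTxt tm i) := PySem.Set.mem_add _ _ _
        by_cases hxt : pvTxt tm x = pvTxt tm i
        · rw [if_pos hxt.symm, List.tail_cons]
          have hqT : q (pvTxt tm x) = true := by rw [hxt]; exact hq
          have hTs : pvTxt tm x ∉ s := fun h => hs (hxt ▸ h)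
          simp only [List.mem_cons, ih, hadd]
          tauto
        · rw [if_neg (fun h => hxt h.symm)]
          have hxi : x ≠ i := fun h => hxt (h ▸ rfl)
          simp only [List.mem_cons, ih, hadd]
          tauto
    · rw [if_neg hq]
      by_cases hxt : pvTxt tm x = pvTxt tm i
      · have hqT : ¬ q (pvTxt tm x) = true := by rw [hxt]; exact hq
        simp only [List.mem_cons, ih]
        tauto
      · rw [if_neg (fun h => hxt h.symm)]
        have hxi : x ≠ i := fun h => hxt (h ▸ rfl)
        simp only [List.mem_cons, ih]
        tauto

-- B's Counter value is the size of A's per-text group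
theorem pvCounts_getD (tm : List (String × String)) (ids : List String) (t : String) (ht : t ≠ "") :
    (PySem.Dict.counter
        ((ids.map (fun iid => PySem.Dict.getD (⟨tm⟩ : PySem.Dict String String) iid "")).filter
          (fun t => t != ""))).getD t 0
      = ((pvGroup tm ids t).length : Int) := by
  rw [PySem.Dict.getD_counter]
  rw [List.count_filter (by simpa using ht)]
  have : (ids.map (fun iid => PySem.Dict.getD (⟨tm⟩ : PySem.Dict String String) iid "")).count t
      = (pvGroup tm ids t).length := by
    simp only [List.count, List.countP_map, pvGroup, ← List.countP_eq_length_filter]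
    rfl
  rw [this]

-- A's result, normalised: one pvIns over the flattened duplicate lists
theorem pvA_eq (tm : List (String × String)) (ids : List String) (htm : ¬ tm = []) :
    deduplicate_thesis_py tm ids
      = (pvIns tm ⟨tm⟩
          ((PySem.Set.ofList ((ids.filter (fun i => pvTxt tm i != "")).map (pvTxt tm))).flatMap
            (fun t => if (200 : Int) < PySem.Str.len t ∧ (3 : Int) ≤ PySem.List.len (pvGroup tm ids t)
              then (pvGroup tm ids t).tail else []))).items := by
  unfold deduplicate_thesis_py
  rw [if_neg htm]
  simp only []
  rw [pvGroupDict_items tm ids]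
  rw [List.foldl_map]
  have hstep : (fun (r : PySem.Dict String String) t =>
      if (200 : Int) < PySem.Str.len ((fun t => (t, pvGroup tm ids t)) t).1
          ∧ (3 : Int) ≤ PySem.List.len ((fun t => (t, pvGroup tm ids t)) t).2 then
        (PySem.List.slice ((fun t => (t, pvGroup tm ids t)) t).2 (some 1) none).foldl
          (fun r iid => r.insert iid (truncate_thesis ((fun t => (t, pvGroup tm ids t)) t).1 120)) r
      else r)
      = (fun r t =>
        if (200 : Int) < PySem.Str.len t ∧ (3 : Int) ≤ PySem.List.len (pvGroup tm ids t) then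
          pvIns tm r ((pvGroup tm ids t).tail)
        else r) := by
    funext r t
    simp only []
    by_cases hc : (200 : Int) < PySem.Str.len t ∧ (3 : Int) ≤ PySem.List.len (pvGroup tm ids t)
    · rw [if_pos hc, if_pos hc, PySem.List.slice_from_one]
      apply PySem.List.foldl_congr_mem
      intro acc iid hiid
      have : pvTxt tm iid = t :=
        ((pvGroup_mem tm ids t iid).1 (List.mem_of_mem_tail hiid)).2
      simp [pvVal, this]
    · rw [if_neg hc, if_neg hc]
  rw [hstep]
  rw [pvFold_if_inner tm
    (fun t => (200 : Int) < PySem.Str.len t ∧ (3 : Int) ≤ PySem.List.len (pvGroup tm ids t))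
    (fun t => (pvGroup tm ids t).tail)]

-- B's result, normalised: one pvIns over the picked ids
theorem pvB_eq (tm : List (String × String)) (ids : List String) (htm : ¬ tm = []) :
    deduplicate_thesis_py_alt tm ids
      = (pvIns tm ⟨tm⟩
          (pvPick tm
            (fun t => decide (t ≠ "" ∧ (200 : Int) < PySem.Str.len t ∧
              (3 : Int) ≤ (PySem.Dict.counter
                ((ids.map (fun iid => PySem.Dict.getD (⟨tm⟩ : PySem.Dict String String) iid "")).filter
                  (fun t => t != ""))).getD t 0))
            PySem.Set.empty ids)).items := by
  unfold deduplicate_thesis_py_alt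
  rw [if_neg htm]
  simp only []
  rw [show (fun (st : PySem.Dict String String × PySem.Set String) iid =>
      let text := PySem.Dict.getD (⟨tm⟩ : PySem.Dict String String) iid ""
      if text ≠ "" ∧ (200 : Int) < PySem.Str.len text ∧
          (3 : Int) ≤ (PySem.Dict.counter
            ((ids.map (fun iid => PySem.Dict.getD (⟨tm⟩ : PySem.Dict String String) iid "")).filter
              (fun t => t != ""))).getD text 0 then
        if text ∈ st.2 then (st.1.insert iid (truncate_thesis text 120), st.2)
        else (st.1, PySem.Set.add st.2 text)
      else st)
    = (fun (st : PySem.Dict String String × PySem.Set String) iid =>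
        let text := pvTxt tm iid
        if (fun t => decide (t ≠ "" ∧ (200 : Int) < PySem.Str.len t ∧
            (3 : Int) ≤ (PySem.Dict.counter
              ((ids.map (fun iid => PySem.Dict.getD (⟨tm⟩ : PySem.Dict String String) iid "")).filter
                (fun t => t != ""))).getD t 0)) text = true then
          if text ∈ st.2 then (st.1.insert iid (truncate_thesis text 120), st.2)
          else (st.1, PySem.Set.add st.2 text)
        else st)
    from by
      funext st iid
      simp only [decide_eq_true_eq]
      rfl]
  exact congrArg PySem.Dict.items (pvB_fold tm
    (fun t => decide (t ≠ "" ∧ (200 : Int) < PySem.Str.len t ∧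
      (3 : Int) ≤ (PySem.Dict.counter
        ((ids.map (fun iid => PySem.Dict.getD (⟨tm⟩ : PySem.Dict String String) iid "")).filter
          (fun t => t != ""))).getD t 0))
    ids PySem.Set.empty ⟨tm⟩)

-- ===== VERDICT (by name: the statement is the Claim_ definition above) =====
theorem deduplicate_thesis_py_spec : Claim_equal_deduplicate_thesis_py := by
  intro tm ids _
  unfold Spec_deduplicate_thesis_py
  by_cases htm : tm = []
  · subst htm
    simp [deduplicate_thesis_py, deduplicate_thesis_py_alt]
  · rw [pvA_eq tm ids htm, pvB_eq tm ids htm]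
    -- the common membership characterisation of both insert lists
    have hmemA : ∀ x : String,
        x ∈ (PySem.Set.ofList ((ids.filter (fun i => pvTxt tm i != "")).map (pvTxt tm))).flatMap
            (fun t => if (200 : Int) < PySem.Str.len t ∧ (3 : Int) ≤ PySem.List.len (pvGroup tm ids t)
              then (pvGroup tm ids t).tail else [])
          ↔ (pvTxt tm x ≠ "" ∧ (200 : Int) < PySem.Str.len (pvTxt tm x) ∧
              (3 : Int) ≤ PySem.List.len (pvGroup tm ids (pvTxt tm x)) ∧
              x ∈ (pvGroup tm ids (pvTxt tm x)).tail) := by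
      intro x
      rw [List.mem_flatMap]
      constructor
      · rintro ⟨t, htK, hx⟩
        by_cases hc : (200 : Int) < PySem.Str.len t ∧ (3 : Int) ≤ PySem.List.len (pvGroup tm ids t)
        · rw [if_pos hc] at hx
          have hxt : pvTxt tm x = t :=
            ((pvGroup_mem tm ids t x).1 (List.mem_of_mem_tail hx)).2
          have ht : t ≠ "" := by
            rcases List.mem_map.1 ((PySem.Set.mem_ofList _ _).1 htK) with ⟨i, hi, rfl⟩
            simpa using (List.mem_filter.1 hi).2
          rw [hxt]
          exact ⟨ht, hc.1, hc.2, hx⟩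
        · rw [if_neg hc] at hx
          exact absurd hx (List.not_mem_nil)
      · rintro ⟨ht, h1, h2, h3⟩
        refine ⟨pvTxt tm x, ?_, ?_⟩
        · have hxids : x ∈ ids :=
            ((pvGroup_mem tm ids _ x).1 (List.mem_of_mem_tail h3)).1
          exact (PySem.Set.mem_ofList _ _).2
            (List.mem_map.2 ⟨x, List.mem_filter.2 ⟨hxids, by simpa using ht⟩, rfl⟩)
        · rw [if_pos ⟨h1, h2⟩]
          exact h3
    have hmemB : ∀ x : String,
        x ∈ pvPick tm
            (fun t => decide (t ≠ "" ∧ (200 : Int) < PySem.Str.len t ∧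
              (3 : Int) ≤ (PySem.Dict.counter
                ((ids.map (fun iid => PySem.Dict.getD (⟨tm⟩ : PySem.Dict String String) iid "")).filter
                  (fun t => t != ""))).getD t 0))
            PySem.Set.empty ids
          ↔ (pvTxt tm x ≠ "" ∧ (200 : Int) < PySem.Str.len (pvTxt tm x) ∧
              (3 : Int) ≤ PySem.List.len (pvGroup tm ids (pvTxt tm x)) ∧
              x ∈ (pvGroup tm ids (pvTxt tm x)).tail) := by
      intro x
      rw [pvPick_mem]
      have hempty : pvTxt tm x ∉ PySem.Set.empty := by simp [PySem.Set.empty]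
      simp only [decide_eq_true_eq]
      constructor
      · rintro ⟨⟨ht, h1, h2⟩, hd⟩
        rcases hd with ⟨hmem, _⟩ | htail
        · exact absurd hmem hempty
        · rw [pvCounts_getD tm ids _ ht] at h2
          refine ⟨ht, h1, ?_, htail⟩
          rw [PySem.List.len_eq]
          exact h2
      · rintro ⟨ht, h1, h2, h3⟩
        rw [PySem.List.len_eq] at h2
        exact ⟨⟨ht, h1, by rw [pvCounts_getD tm ids _ ht]; exact h2⟩, Or.inr h3⟩
    rw [pvIns_items tm tm _ (fun x hx => pvContains_of_txt_ne tm x ((hmemA x).1 hx).1),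
      pvIns_items tm tm _ (fun x hx => pvContains_of_txt_ne tm x ((hmemB x).1 hx).1)]
    apply List.map_congr_left
    intro p _
    have hiff := (hmemA p.1).trans (hmemB p.1).symm
    by_cases h : p.1 ∈ (PySem.Set.ofList ((ids.filter (fun i => pvTxt tm i != "")).map (pvTxt tm))).flatMap
        (fun t => if (200 : Int) < PySem.Str.len t ∧ (3 : Int) ≤ PySem.List.len (pvGroup tm ids t)
          then (pvGroup tm ids t).tail else [])
    · rw [if_pos h, if_pos (hiff.1 h)]
    · rw [if_neg h, if_neg (fun hh => h (hiff.2 hh))]
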